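-- pv_equiv track=rewrite | github.com/Shubham20091999/Problems | HackerRank/(-) Beautiful Quadruples.py | beautifulQuadruples
-- ===== SOURCE A (Python) =====
-- def beautifulQuadruples(a, b, c, d):
--     a,b,c,d = sorted([a,b,c,d])
--     # Maximum num that c^d will take
--     max_num = 2 ** (len(bin(d))-2)
--
--     # To save the count of c^d
--     cnt = [0] * max_num
--
--     # total number of c^d
--     all_cnt = 0
--     for i in range(1,c+1):
--         for j in range(i,d+1):
--             cnt[i^j] += 1
--             all_cnt+=1
--     ret = 0
--     # Cuz b is bigger than a
--     for i in range(1,b+1):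
--         for j in range(1,min(a+1,i+1)):
--             # Removing all the possible pairs where i^j is same
--             ret += all_cnt - cnt[i^j]
--         for k in range(i, d+1):
--             cnt[i^k] -= 1
--             all_cnt -= 1
--     return ret
-- ===== SOURCE B (Python) =====
-- def beautifulQuadruples(a, b, c, d):
--     a, b, c, d = sorted([a, b, c, d])
--     count = 0
--     for w in range(1, a + 1):
--         for x in range(w, b + 1):
--             for y in range(x, c + 1):
--                 for z in range(y, d + 1):
--                     if w ^ x != y ^ z:
--                         count += 1
--     return count
-- ===== Notes on version B (the rewrite author's own statement) =====
-- stated objective: simpler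
-- what changed: Replaces A's incremental XOR-histogram array (cnt/all_cnt bookkeeping updated while sweeping the second index) with the direct definitional brute force: four nested loops over W<=X<=Y<=Z counting quadruples with W^X != Y^Z.
import Mathlib
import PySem

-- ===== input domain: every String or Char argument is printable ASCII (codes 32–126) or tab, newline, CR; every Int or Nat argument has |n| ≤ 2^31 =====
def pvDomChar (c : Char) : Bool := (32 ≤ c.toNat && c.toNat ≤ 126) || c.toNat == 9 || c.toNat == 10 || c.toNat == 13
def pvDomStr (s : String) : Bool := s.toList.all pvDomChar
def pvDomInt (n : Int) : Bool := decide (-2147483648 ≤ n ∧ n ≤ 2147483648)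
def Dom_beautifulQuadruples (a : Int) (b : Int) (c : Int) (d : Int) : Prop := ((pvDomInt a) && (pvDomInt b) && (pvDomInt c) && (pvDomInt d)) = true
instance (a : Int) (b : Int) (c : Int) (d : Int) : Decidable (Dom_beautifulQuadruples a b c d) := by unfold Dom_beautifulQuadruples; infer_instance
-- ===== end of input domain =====

-- B replaces A's incremental XOR-count array with the direct definitional brute force
-- (four nested loops over W ≤ X ≤ Y ≤ Z counting W^X ≠ Y^Z); objective: simpler, not faster.

-- ===== PORT A =====

-- shared primitive: Python's `x ^ y`; exact for the nonnegative operands that occur here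
-- (every xor in both programs is taken on loop indices ≥ 1)
-- we use PySem.Int.bxor, Python-exact on all Ints.

-- len(bin(n)) - 2 for n ≥ 0  (number of binary digits of n, with bin(0) = '0b0')
def pyBinDigits : Nat → Nat
  | 0 => 1
  | 1 => 1
  | n + 2 => pyBinDigits ((n + 2) / 2) + 1
decreasing_by exact Nat.div_lt_self (by omega) (by omega)

-- max_num = 2 ** (len(bin(d)) - 2) ; for d < 0, bin(d) carries a leading '-'
def pyMaxNum (d : Int) : Nat := 2 ^ (pyBinDigits d.natAbs + (if d < 0 then 1 else 0))

def beautifulQuadruplesCore (a b c d : Int) : Int :=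
  let maxNum := pyMaxNum d
  -- cnt = [0]*max_num ; all_cnt = 0 ; for i in range(1,c+1): for j in range(i,d+1): …
  let st1 := (PySem.List.pyRange 1 (c + 1)).foldl (fun st i =>
      (PySem.List.pyRange i (d + 1)).foldl (fun st j =>
        (st.1.modify (PySem.Int.bxor i j).toNat (· + 1), st.2 + 1)) st)
      (Array.replicate maxNum (0 : Int), (0 : Int))
  -- ret = 0 ; for i in range(1,b+1): …
  let st2 := (PySem.List.pyRange 1 (b + 1)).foldl (fun st i =>
      let ret := (PySem.List.pyRange 1 (min (a + 1) (i + 1))).foldl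
          (fun r j => r + (st.2.1 - st.1.getD (PySem.Int.bxor i j).toNat 0)) st.2.2
      let st' := (PySem.List.pyRange i (d + 1)).foldl
          (fun p k => (p.1.modify (PySem.Int.bxor i k).toNat (· - 1), p.2 - 1)) (st.1, st.2.1)
      (st'.1, st'.2, ret)) (st1.1, st1.2, (0 : Int))
  st2.2.2

def beautifulQuadruples (a : Int) (b : Int) (c : Int) (d : Int) : Int :=
  -- a,b,c,d = sorted([a,b,c,d])  (a 4-list always sorts to a 4-list; the `_` arm is unreachable)
  match PySem.List.sorted [a, b, c, d] (fun x => x) false with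
  | [a', b', c', d'] => beautifulQuadruplesCore a' b' c' d'
  | _ => 0

-- ===== PORT B =====

def beautifulQuadruplesBrute (a b c d : Int) : Int :=
  (PySem.List.pyRange 1 (a + 1)).foldl (fun acc w =>
    (PySem.List.pyRange w (b + 1)).foldl (fun acc x =>
      (PySem.List.pyRange x (c + 1)).foldl (fun acc y =>
        (PySem.List.pyRange y (d + 1)).foldl (fun acc z =>
          if PySem.Int.bxor w x ≠ PySem.Int.bxor y z then acc + 1 else acc) acc) acc) acc)
    (0 : Int)

def beautifulQuadruples_alt (a : Int) (b : Int) (c : Int) (d : Int) : Int :=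
  -- a, b, c, d = sorted([a, b, c, d])  (a 4-list sorts to a 4-list, so the four reads are exact)
  let s := PySem.List.sorted [a, b, c, d] (fun x => x) false
  beautifulQuadruplesBrute (s.getD 0 0) (s.getD 1 0) (s.getD 2 0) (s.getD 3 0)

-- ===== PRECONDITION & SPEC =====
def Spec_beautifulQuadruples (a : Int) (b : Int) (c : Int) (d : Int) (out : Int) : Prop := out = beautifulQuadruples_alt a b c d
instance (a : Int) (b : Int) (c : Int) (d : Int) (out : Int) : Decidable (Spec_beautifulQuadruples a b c d out) := by unfold Spec_beautifulQuadruples; infer_instance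

-- ===== CLAIM (what is proved, stated in full; the proofs are below) =====
def Claim_equal_beautifulQuadruples : Prop := ∀ (a : Int) (b : Int) (c : Int) (d : Int), Dom_beautifulQuadruples a b c d → Spec_beautifulQuadruples a b c d (beautifulQuadruples a b c d)

-- ===== LEMMAS AND PROOFS =====

-- the multiset of pairs (y,z) with x ≤ y ≤ c, y ≤ z ≤ d, as a list
def bqPairs (x c d : Int) : List (Int × Int) :=
  (PySem.List.pyRange x (c + 1)).flatMap (fun y =>
    (PySem.List.pyRange y (d + 1)).map (fun z => (y, z)))

-- number of pairs of P whose xor differs from v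
def bqNE (P : List (Int × Int)) (v : Int) : Int :=
  (P.countP (fun p => decide (PySem.Int.bxor p.1 p.2 ≠ v)) : Int)

-- the invariant tying A's (cnt, all_cnt) to the abstract pair multiset P
def bqInv (N : Nat) (cnt : Array Int) (ac : Int) (P : List (Int × Int)) : Prop :=
  cnt.size = N ∧ ac = (P.length : Int) ∧
  ∀ v : Nat, v < N →
    cnt.getD v 0 = (P.countP (fun p => decide (PySem.Int.bxor p.1 p.2 = (v : Int))) : Int)

-- a pair whose xor is a valid index
def bqOk (N : Nat) (p : Int × Int) : Prop :=
  0 ≤ p.1 ∧ 0 ≤ p.2 ∧ (PySem.Int.bxor p.1 p.2).toNat < N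

lemma lt_two_pow_pyBinDigits : ∀ n : Nat, n < 2 ^ pyBinDigits n := by
  intro n
  induction n using Nat.strong_induction_on with
  | _ n ih =>
    match n with
    | 0 => simp [pyBinDigits]
    | 1 => simp [pyBinDigits]
    | n + 2 =>
      rw [pyBinDigits]
      have h := ih ((n + 2) / 2) (Nat.div_lt_self (by omega) (by omega))
      have : n + 2 < 2 * (((n + 2) / 2) + 1) := by omega
      calc n + 2 < 2 * (((n + 2) / 2) + 1) := this
        _ ≤ 2 * 2 ^ pyBinDigits ((n + 2) / 2) := by omega
        _ = 2 ^ (pyBinDigits ((n + 2) / 2) + 1) := by ring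

lemma bqOk_of_bounds (d : Int) (p : Int × Int)
    (h1 : 1 ≤ p.1) (h2 : p.1 ≤ d) (h3 : 1 ≤ p.2) (h4 : p.2 ≤ d) :
    bqOk (pyMaxNum d) p := by
  have hx0 : (0 : Int) ≤ p.1 := by omega
  have hy0 : (0 : Int) ≤ p.2 := by omega
  refine ⟨hx0, hy0, ?_⟩
  rw [PySem.Int.bxor_of_nonneg hx0 hy0, Int.toNat_natCast]
  have hd0 : (0 : Int) ≤ d := by omega
  have hxa : p.1.toNat ≤ d.natAbs := by omega
  have hya : p.2.toNat ≤ d.natAbs := by omega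
  have hb := lt_two_pow_pyBinDigits d.natAbs
  have hxor : p.1.toNat ^^^ p.2.toNat < 2 ^ pyBinDigits d.natAbs :=
    Nat.xor_lt_two_pow (by omega) (by omega)
  have : 2 ^ pyBinDigits d.natAbs ≤ pyMaxNum d := by
    unfold pyMaxNum
    exact Nat.pow_le_pow_right (by omega) (by omega)
  omega

lemma mem_bqPairs {x c d : Int} {p : Int × Int} :
    p ∈ bqPairs x c d ↔ x ≤ p.1 ∧ p.1 ≤ c ∧ p.1 ≤ p.2 ∧ p.2 ≤ d := by
  obtain ⟨y, z⟩ := p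
  simp only [bqPairs, List.mem_flatMap, List.mem_map, Prod.mk.injEq,
    PySem.List.mem_pyRange_one]
  constructor
  · rintro ⟨y', ⟨hy1, hy2⟩, z', ⟨hz1, hz2⟩, rfl, rfl⟩
    omega
  · rintro ⟨h1, h2, h3, h4⟩
    exact ⟨y, by omega, z, by omega, rfl, rfl⟩

lemma arrGetD_modify (a : Array Int) (i v : Nat) (f : Int → Int) (hv : v < a.size) :
    (a.modify i f).getD v 0 = if i = v then f (a.getD v 0) else a.getD v 0 := by
  have hv' : v < (a.modify i f).size := by simpa [Array.size_modify] using hv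
  rw [Array.getD_eq_getD_getElem?, Array.getD_eq_getD_getElem?]
  rw [Array.getElem?_eq_getElem hv', Array.getElem?_eq_getElem hv]
  simp [Array.getElem_modify]

lemma bqInv_add {N : Nat} {cnt : Array Int} {ac : Int} {P : List (Int × Int)}
    (p : Int × Int) (h : bqInv N cnt ac P) (hp : bqOk N p) :
    bqInv N (cnt.modify (PySem.Int.bxor p.1 p.2).toNat (· + 1)) (ac + 1) (P ++ [p]) := by
  obtain ⟨hs, hl, hc⟩ := h
  obtain ⟨hp1, hp2, hpN⟩ := hp
  have hxor0 : (0 : Int) ≤ PySem.Int.bxor p.1 p.2 := by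
    rw [PySem.Int.bxor_of_nonneg hp1 hp2]; positivity
  refine ⟨by simpa [Array.size_modify] using hs, by simp [hl], ?_⟩
  intro v hv
  rw [arrGetD_modify _ _ _ _ (by omega)]
  rw [List.countP_append, hc v hv]
  by_cases he : (PySem.Int.bxor p.1 p.2).toNat = v
  · have : PySem.Int.bxor p.1 p.2 = (v : Int) := by omega
    simp [this]
  · have : PySem.Int.bxor p.1 p.2 ≠ (v : Int) := by omega
    simp [he, this]

lemma bqInv_remove {N : Nat} {cnt : Array Int} {ac : Int}
    (q : Int × Int) (P : List (Int × Int)) (h : bqInv N cnt ac (q :: P)) (hq : bqOk N q) :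
    bqInv N (cnt.modify (PySem.Int.bxor q.1 q.2).toNat (· - 1)) (ac - 1) P := by
  obtain ⟨hs, hl, hc⟩ := h
  obtain ⟨hp1, hp2, hpN⟩ := hq
  refine ⟨by simpa [Array.size_modify] using hs, by simp at hl ⊢; omega, ?_⟩
  intro v hv
  rw [arrGetD_modify _ _ _ _ (by omega)]
  rw [hc v hv]
  by_cases he : (PySem.Int.bxor q.1 q.2).toNat = v
  · have hxor0 : (0 : Int) ≤ PySem.Int.bxor q.1 q.2 := by
      rw [PySem.Int.bxor_of_nonneg hp1 hp2]; positivity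
    have : PySem.Int.bxor q.1 q.2 = (v : Int) := by omega
    simp [this]
  · by_cases he2 : PySem.Int.bxor q.1 q.2 = (v : Int)
    · exfalso; omega
    · simp [he, he2]

-- reading all_cnt - cnt[v] under the invariant
lemma bqInv_read {N : Nat} {cnt : Array Int} {ac : Int} {P : List (Int × Int)}
    (h : bqInv N cnt ac P) (v : Int) (h0 : 0 ≤ v) (hN : v.toNat < N) :
    ac - cnt.getD v.toNat 0 = bqNE P v := by
  obtain ⟨hs, hl, hc⟩ := h
  rw [hc v.toNat hN, hl]
  have hcast : ((v.toNat : Nat) : Int) = v := by omega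
  rw [hcast]
  have := List.length_eq_countP_add_countP (l := P)
    (fun p => decide (PySem.Int.bxor p.1 p.2 = v))
  unfold bqNE
  have hq : P.countP (fun p => decide ¬(decide (PySem.Int.bxor p.1 p.2 = v) = true))
      = P.countP (fun p => decide (PySem.Int.bxor p.1 p.2 ≠ v)) := by
    apply List.countP_congr; intro x _; simp
  omega

-- nested fold over a range of ranges = fold over the flatMap
lemma foldl_foldl_flatMap {α β γ : Type} (l : List α) (f : α → List β) (g : γ → β → γ) (s : γ) :
    l.foldl (fun s i => (f i).foldl g s) s = (l.flatMap f).foldl g s := by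
  induction l generalizing s with
  | nil => rfl
  | cons x xs ih => simp [List.flatMap_cons, List.foldl_append, ih]

lemma bqInv_fold_add {N : Nat} (L : List (Int × Int)) :
    ∀ (cnt : Array Int) (ac : Int) (P : List (Int × Int)),
    bqInv N cnt ac P → (∀ p ∈ L, bqOk N p) →
    bqInv N
      (L.foldl (fun st p => (st.1.modify (PySem.Int.bxor p.1 p.2).toNat (· + 1), st.2 + 1)) (cnt, ac)).1
      (L.foldl (fun st p => (st.1.modify (PySem.Int.bxor p.1 p.2).toNat (· + 1), st.2 + 1)) (cnt, ac)).2
      (P ++ L) := by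
  induction L with
  | nil => intro cnt ac P h _; simpa using h
  | cons q L ih =>
    intro cnt ac P h hok
    have h1 := bqInv_add q h (hok q (by simp))
    have := ih _ _ (P ++ [q]) h1 (fun p hp => hok p (by simp [hp]))
    simpa using this

lemma bqInv_fold_remove {N : Nat} (Q : List (Int × Int)) :
    ∀ (cnt : Array Int) (ac : Int) (P : List (Int × Int)),
    bqInv N cnt ac (Q ++ P) → (∀ p ∈ Q, bqOk N p) →
    bqInv N
      (Q.foldl (fun st p => (st.1.modify (PySem.Int.bxor p.1 p.2).toNat (· - 1), st.2 - 1)) (cnt, ac)).1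
      (Q.foldl (fun st p => (st.1.modify (PySem.Int.bxor p.1 p.2).toNat (· - 1), st.2 - 1)) (cnt, ac)).2
      P := by
  induction Q with
  | nil => intro cnt ac P h _; simpa using h
  | cons q Q ih =>
    intro cnt ac P h hok
    have h1 := bqInv_remove q (Q ++ P) (by simpa using h) (hok q (by simp))
    exact ih _ _ P h1 (fun p hp => hok p (by simp [hp]))

lemma bqInv_init (N : Nat) : bqInv N (Array.replicate N (0 : Int)) 0 [] := by
  refine ⟨by simp, by simp, ?_⟩
  intro v hv
  rw [Array.getD_eq_getD_getElem?, Array.getElem?_eq_getElem (by simpa using hv)]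
  simp

-- pairs decompose row by row
lemma bqPairs_cons {x c d : Int} (h : x ≤ c) :
    bqPairs x c d =
      ((PySem.List.pyRange x (d + 1)).map (fun k => (x, k))) ++ bqPairs (x + 1) c d := by
  unfold bqPairs
  rw [PySem.List.pyRange_one_cons (by omega : x < c + 1), List.flatMap_cons]

-- sums over pyRange as Finset.Ico sums
lemma ico_cons {lo hi : Int} (h : lo < hi) :
    Finset.Ico lo hi = insert lo (Finset.Ico (lo + 1) hi) := by
  ext x; simp [Finset.mem_Ico]; omega

lemma sum_map_pyRange (f : Int → Int) : ∀ (k : Nat) (lo hi : Int), (hi - lo).toNat = k →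
    ((PySem.List.pyRange lo hi).map f).sum = ∑ x ∈ Finset.Ico lo hi, f x := by
  intro k
  induction k with
  | zero =>
    intro lo hi hk
    rw [PySem.List.pyRange_one_eq_nil (by omega), Finset.Ico_eq_empty (by omega)]
    simp
  | succ n ih =>
    intro lo hi hk
    rw [PySem.List.pyRange_one_cons (by omega), ico_cons (by omega)]
    rw [Finset.sum_insert (by simp [Finset.mem_Ico])]
    simp only [List.map_cons, List.sum_cons]
    rw [ih (lo + 1) hi (by omega)]

-- exchanging the order of the two triangular sums
lemma bq_swap (a b : Int) (F : Int → Int → Int) :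
    (∑ w ∈ Finset.Ico 1 (a + 1), ∑ x ∈ Finset.Ico w (b + 1), F w x)
      = ∑ x ∈ Finset.Ico 1 (b + 1), ∑ w ∈ Finset.Ico 1 (min (a + 1) (x + 1)), F w x := by
  apply Finset.sum_comm'
  intro w x
  simp only [Finset.mem_Ico]
  omega

-- counting fold = countP
lemma foldl_ite_count (v : Int) : ∀ (P : List (Int × Int)) (acc : Int),
    P.foldl (fun acc p => if v ≠ PySem.Int.bxor p.1 p.2 then acc + 1 else acc) acc
      = acc + (P.countP (fun p => decide (PySem.Int.bxor p.1 p.2 ≠ v)) : Int) := by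
  intro P
  induction P with
  | nil => intro acc; simp
  | cons q Q ih =>
    intro acc
    by_cases h : v ≠ PySem.Int.bxor q.1 q.2
    · simp only [List.foldl_cons, if_pos h, List.countP_cons, ih]
      have : PySem.Int.bxor q.1 q.2 ≠ v := fun he => h he.symm
      simp [this]; ring
    · simp only [List.foldl_cons, if_neg h, List.countP_cons, ih]
      have : ¬ PySem.Int.bxor q.1 q.2 ≠ v := by tauto
      simp [this]

-- B's two inner loops count the pairs whose xor differs from w^x
lemma brute_inner (w x c d : Int) (acc : Int) :
    (PySem.List.pyRange x (c + 1)).foldl (fun acc y =>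
        (PySem.List.pyRange y (d + 1)).foldl (fun acc z =>
          if PySem.Int.bxor w x ≠ PySem.Int.bxor y z then acc + 1 else acc) acc) acc
      = acc + bqNE (bqPairs x c d) (PySem.Int.bxor w x) := by
  have hrow : ∀ (y acc' : Int),
      (PySem.List.pyRange y (d + 1)).foldl (fun acc z =>
        if PySem.Int.bxor w x ≠ PySem.Int.bxor y z then acc + 1 else acc) acc'
      = ((PySem.List.pyRange y (d + 1)).map (fun z => (y, z))).foldl
          (fun acc (p : Int × Int) =>
            if PySem.Int.bxor w x ≠ PySem.Int.bxor p.1 p.2 then acc + 1 else acc) acc' := by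
    intro y acc'
    rw [List.foldl_map]
  simp only [hrow]
  rw [foldl_foldl_flatMap]
  rw [show ((PySem.List.pyRange x (c + 1)).flatMap
      (fun y => (PySem.List.pyRange y (d + 1)).map (fun z => (y, z)))) = bqPairs x c d from rfl]
  exact foldl_ite_count _ _ _

-- A's second loop computes the double sum, maintaining the invariant
lemma loop2 (a b c d : Int) (hbc : b ≤ c) (hcd : c ≤ d) :
    ∀ (k : Nat) (i : Int), (b + 1 - i).toNat = k → 1 ≤ i →
    ∀ (cnt : Array Int) (ac ret : Int), bqInv (pyMaxNum d) cnt ac (bqPairs i c d) →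
    ((PySem.List.pyRange i (b + 1)).foldl (fun st i =>
      let r := (PySem.List.pyRange 1 (min (a + 1) (i + 1))).foldl
          (fun r j => r + (st.2.1 - st.1.getD (PySem.Int.bxor i j).toNat 0)) st.2.2
      let st' := (PySem.List.pyRange i (d + 1)).foldl
          (fun p k => (p.1.modify (PySem.Int.bxor i k).toNat (· - 1), p.2 - 1)) (st.1, st.2.1)
      ((st'.1, st'.2, r) : Array Int × Int × Int)) (cnt, ac, ret)).2.2
    = ret + ((PySem.List.pyRange i (b + 1)).map (fun x =>
        ((PySem.List.pyRange 1 (min (a + 1) (x + 1))).map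
          (fun w => bqNE (bqPairs x c d) (PySem.Int.bxor x w))).sum)).sum := by
  intro k
  induction k with
  | zero =>
    intro i hk h1 cnt ac ret hInv
    rw [PySem.List.pyRange_one_eq_nil (by omega)]
    simp
  | succ n ih =>
    intro i hk h1 cnt ac ret hInv
    rw [PySem.List.pyRange_one_cons (by omega : i < b + 1)]
    simp only [List.foldl_cons, List.map_cons, List.sum_cons]
    -- the removal fold, in pair form
    have hconv : (PySem.List.pyRange i (d + 1)).foldl
        (fun p k => (p.1.modify (PySem.Int.bxor i k).toNat (· - 1), p.2 - 1)) (cnt, ac)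
        = ((PySem.List.pyRange i (d + 1)).map (fun k => (i, k))).foldl
            (fun st (p : Int × Int) =>
              (st.1.modify (PySem.Int.bxor p.1 p.2).toNat (· - 1), st.2 - 1)) (cnt, ac) := by
      rw [List.foldl_map]
    have hrow_ok : ∀ p ∈ (PySem.List.pyRange i (d + 1)).map (fun k => (i, k)),
        bqOk (pyMaxNum d) p := by
      intro p hp
      simp only [List.mem_map, PySem.List.mem_pyRange_one] at hp
      obtain ⟨k, ⟨hk1, hk2⟩, rfl⟩ := hp
      exact bqOk_of_bounds d (i, k) (by omega) (by omega) (by omega) (by omega)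
    have hdec := bqPairs_cons (c := c) (d := d) (by omega : i ≤ c)
    have hInv' := bqInv_fold_remove
      ((PySem.List.pyRange i (d + 1)).map (fun k => (i, k))) cnt ac
      (bqPairs (i + 1) c d) (by rw [← hdec]; exact hInv) hrow_ok
    rw [← hconv] at hInv'
    -- the ret-accumulating fold
    have hret : ∀ r0 : Int, (PySem.List.pyRange 1 (min (a + 1) (i + 1))).foldl
        (fun r j => r + (ac - cnt.getD (PySem.Int.bxor i j).toNat 0)) r0
        = r0 + ((PySem.List.pyRange 1 (min (a + 1) (i + 1))).map
            (fun j => bqNE (bqPairs i c d) (PySem.Int.bxor i j))).sum := by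
      intro r0
      rw [PySem.List.foldl_congr_mem _ _
        (fun r j => r + bqNE (bqPairs i c d) (PySem.Int.bxor i j)) r0 ?_]
      · exact PySem.List.foldl_add _ _ _
      · intro r j hj
        simp only [PySem.List.mem_pyRange_one] at hj
        have hok := bqOk_of_bounds d (i, j) (by omega) (by omega) (by omega) (by omega)
        obtain ⟨h01, h02, hN⟩ := hok
        have h0 : (0 : Int) ≤ PySem.Int.bxor i j := by
          rw [PySem.Int.bxor_of_nonneg h01 h02]; positivity
        rw [bqInv_read hInv (PySem.Int.bxor i j) h0 hN]
    have := ih (i + 1) (by omega) (by omega)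
      ((PySem.List.pyRange i (d + 1)).foldl
        (fun p k => (p.1.modify (PySem.Int.bxor i k).toNat (· - 1), p.2 - 1)) (cnt, ac)).1
      ((PySem.List.pyRange i (d + 1)).foldl
        (fun p k => (p.1.modify (PySem.Int.bxor i k).toNat (· - 1), p.2 - 1)) (cnt, ac)).2
      ((PySem.List.pyRange 1 (min (a + 1) (i + 1))).foldl
        (fun r j => r + (ac - cnt.getD (PySem.Int.bxor i j).toNat 0)) ret)
      hInv'
    simp only at this ⊢
    rw [this, hret]
    ring

lemma pyRange_sum_bridge (f : Int → Int) (lo hi : Int) :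
    ((PySem.List.pyRange lo hi).map f).sum = ∑ x ∈ Finset.Ico lo hi, f x :=
  sum_map_pyRange f (hi - lo).toNat lo hi rfl

lemma core_eq (a b c d : Int) (_hab : a ≤ b) (hbc : b ≤ c) (hcd : c ≤ d) :
    beautifulQuadruplesCore a b c d = beautifulQuadruplesBrute a b c d := by
  have hrow : ∀ (i : Int) (st : Array Int × Int),
      (PySem.List.pyRange i (d + 1)).foldl (fun st j =>
        (st.1.modify (PySem.Int.bxor i j).toNat (· + 1), st.2 + 1)) st
      = ((PySem.List.pyRange i (d + 1)).map (fun j => (i, j))).foldl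
          (fun st (p : Int × Int) =>
            (st.1.modify (PySem.Int.bxor p.1 p.2).toNat (· + 1), st.2 + 1)) st := by
    intro i st; rw [List.foldl_map]
  have hconv1 : (PySem.List.pyRange 1 (c + 1)).foldl (fun st i =>
      (PySem.List.pyRange i (d + 1)).foldl (fun st j =>
        (st.1.modify (PySem.Int.bxor i j).toNat (· + 1), st.2 + 1)) st)
      (Array.replicate (pyMaxNum d) (0 : Int), (0 : Int))
      = (bqPairs 1 c d).foldl (fun st (p : Int × Int) =>
          (st.1.modify (PySem.Int.bxor p.1 p.2).toNat (· + 1), st.2 + 1))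
        (Array.replicate (pyMaxNum d) (0 : Int), (0 : Int)) := by
    simp only [hrow]
    rw [foldl_foldl_flatMap]
    rfl
  have hok1 : ∀ p ∈ bqPairs 1 c d, bqOk (pyMaxNum d) p := by
    intro p hp
    rw [mem_bqPairs] at hp
    exact bqOk_of_bounds d p (by omega) (by omega) (by omega) (by omega)
  have hInv1 := bqInv_fold_add (N := pyMaxNum d) (bqPairs 1 c d)
    (Array.replicate (pyMaxNum d) 0) 0 [] (bqInv_init _) hok1
  simp only [List.nil_append] at hInv1
  rw [← hconv1] at hInv1
  simp only [beautifulQuadruplesCore, beautifulQuadruplesBrute]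
  rw [loop2 a b c d hbc hcd (b + 1 - 1).toNat 1 rfl (by omega) _ _ 0 hInv1]
  simp only [brute_inner, PySem.List.foldl_add]
  simp only [pyRange_sum_bridge]
  rw [zero_add, zero_add, bq_swap a b (fun w x => bqNE (bqPairs x c d) (PySem.Int.bxor w x))]
  apply Finset.sum_congr rfl
  intro x _
  apply Finset.sum_congr rfl
  intro w _
  rw [PySem.Int.bxor_comm]

-- ===== VERDICT (by name: the statement is the Claim_ definition above) =====
theorem beautifulQuadruples_spec : Claim_equal_beautifulQuadruples := by
  intro a b c d _
  unfold Spec_beautifulQuadruples beautifulQuadruples beautifulQuadruples_alt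
  have hlen : (PySem.List.sorted [a, b, c, d] (fun x => x) false).length = 4 :=
    PySem.List.length_sorted [a, b, c, d] (fun x => x) false
  have hpw := PySem.List.sorted_pairwise [a, b, c, d] (fun x => x)
  generalize hs : PySem.List.sorted [a, b, c, d] (fun x => x) false = s at hlen hpw ⊢
  rcases s with _ | ⟨a', _ | ⟨b', _ | ⟨c', _ | ⟨d', _ | ⟨e, t⟩⟩⟩⟩⟩
  · simp at hlen
  · simp at hlen
  · simp at hlen
  · simp at hlen
  · simp only [List.pairwise_cons, List.mem_cons] at hpw
    simpa using core_eq a' b' c' d' (by tauto) (by tauto) (by tauto)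
  · simp at hlen
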